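-- pv_equiv track=rewrite | github.com/katherine-lau/Minotaur-Maze-Game | hero.py | has_item
-- ===== SOURCE A (Python) =====
-- def has_item(items):
--     has_sword = any(item['name'] == "Sword" for item in items)
--     has_shield = any(item['name'] == "Shield" for item in items)
--     has_hp_amu = any(item['name'] == "Amulet_HP" for item in items)
--     has_ow_amu = any(item['name'] == "Amulet_Ow" for item in items)
--     has_ow_min = any(item['name'] == "Amulet_Ow_Min" for item in items)
--     has_T_sp_amu = any(item['name'] == "Amulet_T_speed" for item in items)
--     has_min_sp_amu = any(item['name'] == "Amulet_min_speed" for item in items)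
--     return has_sword, has_shield, has_hp_amu, has_ow_amu, has_ow_min, has_T_sp_amu, has_min_sp_amu
-- ===== SOURCE B (Python) =====
-- _TARGETS = ('Sword', 'Shield', 'Amulet_HP', 'Amulet_Ow', 'Amulet_Ow_Min',
--             'Amulet_T_speed', 'Amulet_min_speed')
--
--
-- def has_item(items):
--     found = set()
--     for item in items:
--         name = item['name']
--         if name in _TARGETS:
--             found.add(name)
--             if len(found) == 7:
--                 break
--     return tuple(name in found for name in _TARGETS)
-- ===== Notes on version B (the rewrite author's own statement) =====
-- stated objective: alternative
-- what changed: Replaces A's seven separate any-scans over the item list by one single pass that accumulates the target names seen into a set (stopping once all seven are found) and then answers seven membership tests.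
import Mathlib
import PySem

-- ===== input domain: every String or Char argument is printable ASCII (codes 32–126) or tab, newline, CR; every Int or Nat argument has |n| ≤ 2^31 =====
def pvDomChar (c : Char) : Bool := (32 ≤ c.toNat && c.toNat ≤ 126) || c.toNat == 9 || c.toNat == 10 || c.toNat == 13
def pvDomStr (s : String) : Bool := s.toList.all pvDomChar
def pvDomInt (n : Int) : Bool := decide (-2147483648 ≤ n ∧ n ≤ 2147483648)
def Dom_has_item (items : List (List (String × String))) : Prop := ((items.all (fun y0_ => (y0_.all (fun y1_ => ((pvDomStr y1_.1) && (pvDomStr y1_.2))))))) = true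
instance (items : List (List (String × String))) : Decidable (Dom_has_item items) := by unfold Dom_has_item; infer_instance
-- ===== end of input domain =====

-- B makes one pass that accumulates seen target names into a set (breaking once all seven are found)
-- and answers seven membership tests, instead of A's seven separate linear any-scans.


-- ===== PORT A =====
-- any(item['name'] == s for item in items); item['name'] ported through get?: exact under Pre_,
-- where any keyless item is only reached after the scanned-for name already occurred.
def has_item (items : List (List (String × String))) : Bool × Bool × Bool × Bool × Bool × Bool × Bool :=
  let has_sword := items.any (fun item => PySem.Dict.get? ⟨item⟩ "name" == some "Sword")
  let has_shield := items.any (fun item => PySem.Dict.get? ⟨item⟩ "name" == some "Shield")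
  let has_hp_amu := items.any (fun item => PySem.Dict.get? ⟨item⟩ "name" == some "Amulet_HP")
  let has_ow_amu := items.any (fun item => PySem.Dict.get? ⟨item⟩ "name" == some "Amulet_Ow")
  let has_ow_min := items.any (fun item => PySem.Dict.get? ⟨item⟩ "name" == some "Amulet_Ow_Min")
  let has_T_sp_amu := items.any (fun item => PySem.Dict.get? ⟨item⟩ "name" == some "Amulet_T_speed")
  let has_min_sp_amu := items.any (fun item => PySem.Dict.get? ⟨item⟩ "name" == some "Amulet_min_speed")
  (has_sword, has_shield, has_hp_amu, has_ow_amu, has_ow_min, has_T_sp_amu, has_min_sp_amu)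

-- ===== PORT B =====
def pvTargets : List String :=
  ["Sword", "Shield", "Amulet_HP", "Amulet_Ow", "Amulet_Ow_Min", "Amulet_T_speed", "Amulet_min_speed"]

-- the for-loop of Source B; item['name'] ported through getD "": exact under Pre_, where any keyless
-- item is only reached after all seven targets were found (so the loop broke before it).
def pvBLoop : List (List (String × String)) → PySem.Set String → PySem.Set String
  | [], found => found
  | item :: rest, found =>
    let name := PySem.Dict.getD ⟨item⟩ "name" ""
    if pvTargets.contains name then
      let found' := PySem.Set.add found name
      if found'.length = 7 then found' else pvBLoop rest found'
    else pvBLoop rest found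

def has_item_alt (items : List (List (String × String))) : Bool × Bool × Bool × Bool × Bool × Bool × Bool :=
  let found := pvBLoop items PySem.Set.empty
  (PySem.Set.contains found "Sword", PySem.Set.contains found "Shield",
   PySem.Set.contains found "Amulet_HP", PySem.Set.contains found "Amulet_Ow",
   PySem.Set.contains found "Amulet_Ow_Min", PySem.Set.contains found "Amulet_T_speed",
   PySem.Set.contains found "Amulet_min_speed")

-- ===== PRECONDITION & SPEC =====
-- Pre_ excludes exactly the inputs on which A raises KeyError — some item lacks the 'name' key
-- before all seven target names have appeared — and on those inputs B raises KeyError as well.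
def Pre_has_item (items : List (List (String × String))) : Prop :=
  (items.zipIdx.all (fun p =>
    PySem.Dict.contains ⟨p.1⟩ "name" ||
    pvTargets.all (fun t =>
      (items.take p.2).any (fun it => PySem.Dict.get? ⟨it⟩ "name" == some t)))) = true
instance (items : List (List (String × String))) : Decidable (Pre_has_item items) := by unfold Pre_has_item; infer_instance

def pvWitness_has_item : (List (List (String × String))) :=
  [[("name", "Sword")], [("name", "Potion"), ("kind", "hp")]]

def Spec_has_item (items : List (List (String × String))) (out : Bool × Bool × Bool × Bool × Bool × Bool × Bool) : Prop := out = has_item_alt items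
instance (items : List (List (String × String))) (out : Bool × Bool × Bool × Bool × Bool × Bool × Bool) : Decidable (Spec_has_item items out) := by unfold Spec_has_item; infer_instance

-- ===== CLAIM (what is proved, stated in full; the proofs are below) =====
def Claim_equal_has_item : Prop := ∀ (items : List (List (String × String))), Dom_has_item items → Pre_has_item items → Spec_has_item items (has_item items)

-- ===== LEMMAS AND PROOFS =====

-- item['name'] tested against a nonempty string: get? and getD "" agree.
theorem get?_beq_getD (item : List (String × String)) (s : String) (hs : s ≠ "") :
    (PySem.Dict.get? ⟨item⟩ "name" == some s) = (PySem.Dict.getD ⟨item⟩ "name" "" == s) := by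
  rw [PySem.Dict.getD_eq_get?_getD]
  cases hg : PySem.Dict.get? (⟨item⟩ : PySem.Dict String String) "name" with
  | none => simpa using fun h => (hs h).elim
  | some v => simp

-- a nodup subset of pvTargets of length 7 contains every target
theorem full_set_mem (found : List String) (hsub : ∀ x ∈ found, x ∈ pvTargets)
    (hnd : found.Nodup) (hlen : found.length = 7) (s : String) (hs : s ∈ pvTargets) :
    s ∈ found := by
  have hsub' : found.toFinset ⊆ pvTargets.toFinset := by
    intro x hx
    exact List.mem_toFinset.2 (hsub x (List.mem_toFinset.1 hx))
  have hcard1 : found.toFinset.card = 7 := by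
    rw [List.toFinset_card_of_nodup hnd, hlen]
  have hcard2 : pvTargets.toFinset.card = 7 := by decide
  have heq : found.toFinset = pvTargets.toFinset :=
    Finset.eq_of_subset_of_card_le hsub' (by omega)
  have : s ∈ found.toFinset := heq ▸ List.mem_toFinset.2 hs
  exact List.mem_toFinset.1 this

-- loop characterisation: membership in the loop's result = already found, or named by some item
theorem pvBLoop_contains (s : String) (hs : s ∈ pvTargets) :
    ∀ (items : List (List (String × String))) (found : PySem.Set String),
      (∀ x ∈ found, x ∈ pvTargets) → List.Nodup found →
      PySem.Set.contains (pvBLoop items found) s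
        = (PySem.Set.contains found s
            || items.any (fun item => PySem.Dict.getD ⟨item⟩ "name" "" == s)) := by
  intro items
  induction items with
  | nil => intro found _ _; simp [pvBLoop]
  | cons item rest ih =>
    intro found hsub hnd
    simp only [pvBLoop]
    set name := PySem.Dict.getD (⟨item⟩ : PySem.Dict String String) "name" "" with hname
    by_cases htgt : pvTargets.contains name
    · simp only [htgt, if_true]
      have hsub' : ∀ x ∈ PySem.Set.add found name, x ∈ pvTargets := by
        intro x hx
        rcases (PySem.Set.mem_add found name x).1 hx with h | h
        · exact hsub x h
        · exact h ▸ (by simpa using htgt)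
      have hnd' : List.Nodup (PySem.Set.add found name) := PySem.Set.nodup_add _ _ hnd
      have hcontains_add :
          PySem.Set.contains (PySem.Set.add found name) s
            = (PySem.Set.contains found s || (name == s)) := by
        rw [Bool.eq_iff_iff]
        simp only [PySem.Set.contains_iff, PySem.Set.mem_add found name s, Bool.or_eq_true,
          beq_iff_eq]
        exact or_congr Iff.rfl eq_comm
      by_cases hlen : (PySem.Set.add found name).length = 7
      · simp only [hlen, if_true]
        have hmem : s ∈ PySem.Set.add found name :=
          full_set_mem _ hsub' hnd' hlen s hs
        have h1 : PySem.Set.contains (PySem.Set.add found name) s = true :=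
          (PySem.Set.contains_iff _ _).2 hmem
        have hor : (PySem.Set.contains found s || (name == s)) = true := by
          rw [← hcontains_add]; exact h1
        rw [h1, List.any_cons]
        simp only [Bool.or_eq_true] at hor
        rcases hor with h | h
        · rw [h, Bool.true_or]
        · have hh : (PySem.Dict.getD (⟨item⟩ : PySem.Dict String String) "name" "" == s) = true := by
            rw [← hname]; exact h
          rw [hh, Bool.true_or, Bool.or_true]
      · simp only [hlen, if_false]
        rw [ih _ hsub' hnd', hcontains_add]
        simp [Bool.or_assoc, ← hname]
    · rw [if_neg (by simpa using htgt)]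
      rw [ih _ hsub hnd]
      have hne : (PySem.Dict.getD (⟨item⟩ : PySem.Dict String String) "name" "" == s) = false := by
        rw [← hname]
        apply beq_eq_false_iff_ne.2
        intro h
        exact htgt (by simpa [h] using hs)
      simp [hne]

-- one component of A = one component of B, for any target name s
theorem component_eq (items : List (List (String × String))) (s : String)
    (hs : s ∈ pvTargets) (hne : s ≠ "") :
    items.any (fun item => PySem.Dict.get? ⟨item⟩ "name" == some s)
      = PySem.Set.contains (pvBLoop items PySem.Set.empty) s := by
  rw [pvBLoop_contains s hs items PySem.Set.empty (by intro x hx; cases hx)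
    List.nodup_nil]
  have : ∀ item : List (String × String),
      (PySem.Dict.get? (⟨item⟩ : PySem.Dict String String) "name" == some s)
        = (PySem.Dict.getD (⟨item⟩ : PySem.Dict String String) "name" "" == s) :=
    fun item => get?_beq_getD item s hne
  simp only [PySem.Set.empty, PySem.Set.contains, List.contains_nil, Bool.false_or]
  simp only [this]

-- ===== VERDICT (by name: the statement is the Claim_ definition above) =====
theorem has_item_spec : Claim_equal_has_item := by
  intro items _ _
  unfold Spec_has_item has_item has_item_alt
  rw [component_eq items "Sword" (by decide) (by decide),
    component_eq items "Shield" (by decide) (by decide),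
    component_eq items "Amulet_HP" (by decide) (by decide),
    component_eq items "Amulet_Ow" (by decide) (by decide),
    component_eq items "Amulet_Ow_Min" (by decide) (by decide),
    component_eq items "Amulet_T_speed" (by decide) (by decide),
    component_eq items "Amulet_min_speed" (by decide) (by decide)]
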